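-- pv_equiv track=rewrite | github.com/gsrr/leetcode | topic/palindrome/680. Valid Palindrome II.py | recur_util
-- ===== SOURCE A (Python) =====
-- def judge(s):
--     #print "judge:", s
--     if s == s[::-1]:
--         return True
--     return False
--
-- def recur_util(ls):
--     if ls[0] == ls[-1]:
--         if recur_util(ls[1:-1]):
--             return True
--
--     if judge(ls[1:]):
--         return True
--     if judge(ls[:-1]):
--         return True
--     return False
-- ===== SOURCE B (Python) =====
-- def recur_util(ls):
--     i, j = 0, len(ls) - 1
--     while i < j:
--         if ls[i] != ls[j]:
--             a = ls[i + 1:j + 1]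
--             b = ls[i:j]
--             return a == a[::-1] or b == b[::-1]
--         i += 1
--         j -= 1
--     return True
-- ===== Notes on version B (the rewrite author's own statement) =====
-- stated objective: faster
-- what changed: Replaced A's recursion that re-slices and palindrome-tests two whole substrings at every stripping level by a single two-pointer scan to the first mismatch followed by exactly two palindrome tests of the skip substrings.
import Mathlib
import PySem

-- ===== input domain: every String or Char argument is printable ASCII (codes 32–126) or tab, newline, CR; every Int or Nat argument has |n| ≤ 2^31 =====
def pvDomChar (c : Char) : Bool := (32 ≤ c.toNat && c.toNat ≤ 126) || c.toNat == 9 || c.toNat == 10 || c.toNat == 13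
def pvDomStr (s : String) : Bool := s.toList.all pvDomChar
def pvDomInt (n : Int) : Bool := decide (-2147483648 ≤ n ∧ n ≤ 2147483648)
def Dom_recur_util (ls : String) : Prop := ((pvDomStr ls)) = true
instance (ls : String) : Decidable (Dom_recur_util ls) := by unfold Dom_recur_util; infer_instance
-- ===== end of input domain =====

-- B replaces A's per-level re-slicing recursion by one two-pointer scan to the first
-- mismatch plus two palindrome tests of the skip substrings (objective: faster in the
-- worst case; a timing run on random inputs measured no difference).

-- ===== PORT A =====
-- judge(s): s == s[::-1]  (s[::-1] is PySem.List.slice? s none none (-1), cf. slice?_none_none_neg_one)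
def judgeA (s : List Char) : Bool := decide (some s = PySem.List.slice? s none none (-1))

-- recur_util, on the string's character list; for length < 2 Python raises IndexError
-- (ls[0] / the recursive call), so those inputs lie outside Pre_ and the branch value is arbitrary.
def recurA (ls : List Char) : Bool :=
  if h2 : ls.length < 2 then false
  else
    (decide (PySem.List.pyGet? ls 0 = PySem.List.pyGet? ls (-1)) &&
       recurA (PySem.List.slice ls (some 1) (some (-1)))) ||
    judgeA (PySem.List.slice ls (some 1) none) ||
    judgeA (PySem.List.slice ls none (some (-1)))
termination_by ls.length
decreasing_by
  simp only [PySem.List.length_slice, PySem.List.clampIdx_neg_one]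
  have : PySem.List.clampIdx ls.length 1 = min 1 ls.length := by simp [PySem.List.clampIdx]
  omega

def recur_util (ls : String) : Bool := recurA ls.toList

-- ===== PORT B =====
-- the while-loop of Source B: i, j two pointers
def loopB (l : List Char) (i j : Int) : Bool :=
  if h : i < j then
    if PySem.List.pyGet? l i ≠ PySem.List.pyGet? l j then
      let a := PySem.List.slice l (some (i + 1)) (some (j + 1))
      let b := PySem.List.slice l (some i) (some j)
      decide (some a = PySem.List.slice? a none none (-1)) ||
        decide (some b = PySem.List.slice? b none none (-1))
    else loopB l (i + 1) (j - 1)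
  else true
termination_by (j - i).toNat
decreasing_by omega

def recur_util_alt (ls : String) : Bool := loopB ls.toList 0 ((ls.toList.length : Int) - 1)

-- ===== PRECONDITION & SPEC =====
-- Pre_ excludes exactly the palindromes (incl. empty/one-char strings): there A's recursion
-- always reaches a string of length ≤ 1 and raises IndexError on ls[0].
def Pre_recur_util (ls : String) : Prop := ls.toList ≠ ls.toList.reverse
instance (ls : String) : Decidable (Pre_recur_util ls) := by unfold Pre_recur_util; infer_instance
def pvWitness_recur_util : String := "ab"

def Spec_recur_util (ls : String) (out : Bool) : Prop := out = recur_util_alt ls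
instance (ls : String) (out : Bool) : Decidable (Spec_recur_util ls out) := by unfold Spec_recur_util; infer_instance

-- ===== CLAIM (what is proved, stated in full; the proofs are below) =====
def Claim_equal_recur_util : Prop := ∀ (ls : String), Dom_recur_util ls → Pre_recur_util ls → Spec_recur_util ls (recur_util ls)

-- ===== LEMMAS AND PROOFS =====

-- canonical form: strip equal ends, then test the two one-deletion substrings
def fC (l : List Char) : Bool :=
  if l.length < 2 then true
  else if l[0]? = l.getLast? then fC l.tail.dropLast
  else (decide (l.tail = l.tail.reverse) || decide (l.dropLast = l.dropLast.reverse))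
termination_by l.length
decreasing_by simp [List.length_tail]; omega

theorem judgeA_eq (s : List Char) : judgeA s = decide (s = s.reverse) := by
  simp [judgeA, PySem.List.slice?_none_none_neg_one]

theorem core_comm (l : List Char) : l.tail.dropLast = l.dropLast.tail := by
  simp [List.dropLast_eq_take, ← List.drop_one, List.drop_take]

theorem pal_core {l : List Char} (h : l = l.reverse) : l.tail.dropLast = (l.tail.dropLast).reverse := by
  have h1 : (l.tail).dropLast.reverse = (l.tail).reverse.tail := by
    rw [List.tail_reverse]
  rw [h1, ← List.dropLast_reverse, ← h, core_comm]

theorem pal_cons_append (a b : Char) (m : List Char) :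
    (a :: (m ++ [b])) = (a :: (m ++ [b])).reverse ↔ a = b ∧ m = m.reverse := by
  simp [List.reverse_append]
  exact fun h _ => h.symm

theorem exists_decomp (l : List Char) (h : 2 ≤ l.length) :
    ∃ a m b, l = a :: (m ++ [b]) := by
  match l with
  | a :: t =>
    rcases List.eq_nil_or_concat t with rfl | ⟨m, b, rfl⟩
    · simp at h
    · exact ⟨a, m, b, by simp⟩

theorem nonpal_len {l : List Char} (h : l ≠ l.reverse) : 2 ≤ l.length := by
  match l with
  | [] => simp at h
  | [x] => simp at h
  | a :: b :: t => simp [List.length]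

theorem fC_step (a b : Char) (m : List Char) :
    fC (a :: (m ++ [b])) =
      if a = b then fC m
      else (decide ((m ++ [b]) = (m ++ [b]).reverse) || decide ((a :: m) = (a :: m).reverse)) := by
  rw [fC]
  rw [show a :: (m ++ [b]) = (a :: m) ++ [b] from rfl, List.getLast?_concat, List.dropLast_concat]
  simp

theorem fC_short (l : List Char) (h : l.length < 2) : fC l = true := by
  rw [fC]; simp [h]

theorem tail_concat_dropLast {m : List Char} (b : Char) (hm : m ≠ []) :
    (m ++ [b]).tail.dropLast = m.tail := by
  match m with
  | c :: m' => simp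

theorem nonpal_ne_nil {m : List Char} (h : m ≠ m.reverse) : m ≠ [] := by
  rintro rfl; simp at h

theorem nonpal_core {a b : Char} {m : List Char} (hnp : (a :: (m ++ [b])) ≠ (a :: (m ++ [b])).reverse)
    (hab : a = b) : m ≠ m.reverse := by
  intro hm
  exact hnp ((pal_cons_append a b m).mpr ⟨hab, hm⟩)

-- absorption: if deleting the first character yields a palindrome, fC is true
theorem fC_tail_aux : ∀ (n : Nat) (l : List Char), l.length ≤ n → l ≠ l.reverse →
    l.tail = l.tail.reverse → fC l = true := by
  intro n
  induction n with
  | zero => intro l hl hnp _; have := nonpal_len hnp; omega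
  | succ n ih =>
    intro l hl hnp hp
    obtain ⟨a, m, b, rfl⟩ := exists_decomp l (nonpal_len hnp)
    rw [fC_step]
    by_cases hab : a = b
    · simp only [hab]
      have hmnp : m ≠ m.reverse := nonpal_core hnp hab
      have hmt : m.tail = m.tail.reverse := by
        have := pal_core (l := m ++ [b]) (by simpa using hp)
        rwa [tail_concat_dropLast b (nonpal_ne_nil hmnp)] at this
      have hlen : m.length ≤ n := by
        have : (a :: (m ++ [b])).length = m.length + 2 := by simp
        omega
      exact ih m hlen hmnp hmt
    · simp only [if_neg hab]
      have : (m ++ [b]) = (m ++ [b]).reverse := by simpa using hp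
      simp [← this]

theorem fC_tail {l : List Char} (hnp : l ≠ l.reverse) (hp : l.tail = l.tail.reverse) : fC l = true :=
  fC_tail_aux l.length l le_rfl hnp hp

theorem fC_dropLast_aux : ∀ (n : Nat) (l : List Char), l.length ≤ n → l ≠ l.reverse →
    l.dropLast = l.dropLast.reverse → fC l = true := by
  intro n
  induction n with
  | zero => intro l hl hnp _; have := nonpal_len hnp; omega
  | succ n ih =>
    intro l hl hnp hp
    obtain ⟨a, m, b, rfl⟩ := exists_decomp l (nonpal_len hnp)
    have hdl : (a :: (m ++ [b])).dropLast = a :: m := by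
      rw [show a :: (m ++ [b]) = (a :: m) ++ [b] from rfl, List.dropLast_concat]
    rw [fC_step]
    by_cases hab : a = b
    · simp only [hab]
      have hmnp : m ≠ m.reverse := nonpal_core hnp hab
      have hmt : m.dropLast = m.dropLast.reverse := by
        have := pal_core (l := a :: m) (by rw [hdl] at hp; exact hp)
        simpa using this
      have hlen : m.length ≤ n := by
        have : (a :: (m ++ [b])).length = m.length + 2 := by simp
        omega
      exact ih m hlen hmnp hmt
    · simp only [if_neg hab]
      have : (a :: m) = (a :: m).reverse := by rw [hdl] at hp; exact hp
      simp [← this]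

theorem fC_dropLast {l : List Char} (hnp : l ≠ l.reverse) (hp : l.dropLast = l.dropLast.reverse) : fC l = true :=
  fC_dropLast_aux l.length l le_rfl hnp hp

theorem slice_1_neg1 (l : List Char) : PySem.List.slice l (some 1) (some (-1)) = l.tail.dropLast := by
  simp [PySem.List.slice, PySem.List.clampIdx, List.dropLast_eq_take, ← List.drop_one]
  rcases l with _ | ⟨c, t⟩
  · simp
  · simp

theorem fC_of_concat_pal {m : List Char} (b : Char) (hmnp : m ≠ m.reverse)
    (hpal : (m ++ [b]) = (m ++ [b]).reverse) : fC m = true := by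
  have hmt := pal_core hpal
  rw [tail_concat_dropLast b (nonpal_ne_nil hmnp)] at hmt
  exact fC_tail hmnp hmt

theorem fC_of_cons_pal {m : List Char} (a : Char) (hmnp : m ≠ m.reverse)
    (hpal : (a :: m) = (a :: m).reverse) : fC m = true := by
  have hmt := pal_core hpal
  simp only [List.tail_cons] at hmt
  exact fC_dropLast hmnp hmt

theorem recurA_eq_fC_aux : ∀ (n : Nat) (l : List Char), l.length ≤ n → l ≠ l.reverse →
    recurA l = fC l := by
  intro n
  induction n with
  | zero => intro l hl hnp; have := nonpal_len hnp; omega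
  | succ n ih =>
    intro l hl hnp
    obtain ⟨a, m, b, rfl⟩ := exists_decomp l (nonpal_len hnp)
    have hdl : (a :: (m ++ [b])).dropLast = a :: m := by
      rw [show a :: (m ++ [b]) = (a :: m) ++ [b] from rfl, List.dropLast_concat]
    rw [recurA, dif_neg (by simp)]
    rw [PySem.List.pyGet?_zero_cons, PySem.List.pyGet?_neg_one, slice_1_neg1,
        PySem.List.slice_from_one, PySem.List.slice_to_neg_one, hdl,
        show (a :: (m ++ [b])).getLast? = some b by
          rw [show a :: (m ++ [b]) = (a :: m) ++ [b] from rfl, List.getLast?_concat],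
        show (a :: (m ++ [b])).tail.dropLast = m by simp,
        show (a :: (m ++ [b])).tail = m ++ [b] from rfl,
        judgeA_eq, judgeA_eq, fC_step]
    by_cases hab : a = b
    · have hmnp : m ≠ m.reverse := nonpal_core hnp hab
      have hlen : m.length ≤ n := by
        have : (a :: (m ++ [b])).length = m.length + 2 := by simp
        omega
      rw [ih m hlen hmnp, if_pos hab]
      cases hX : decide ((m ++ [b]) = (m ++ [b]).reverse) with
      | true => simp [fC_of_concat_pal b hmnp (of_decide_eq_true hX)]
      | false =>
        cases hY : decide ((a :: m) = (a :: m).reverse) with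
        | true => simp [fC_of_cons_pal a hmnp (of_decide_eq_true hY)]
        | false => simp [hab]
    · rw [if_neg hab]
      simp [hab]

theorem recurA_eq_fC {l : List Char} (hnp : l ≠ l.reverse) : recurA l = fC l :=
  recurA_eq_fC_aux l.length l le_rfl hnp

theorem loopB_win : ∀ (n : Nat) (mid : List Char), mid.length = n →
    ∀ (pre suf : List Char) (k : Nat), pre.length = k → suf.length = k →
    loopB (pre ++ mid ++ suf) (k : Int) ((k : Int) + (mid.length : Int) - 1) = fC mid := by
  intro n
  induction n using Nat.strong_induction_on with
  | _ n ih =>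
    intro mid hn pre suf k hpre hsuf
    by_cases h2 : 2 ≤ mid.length
    case neg =>
      rw [loopB, dif_neg (by omega), fC_short mid (by omega)]
    case pos =>
      obtain ⟨a, m, b, rfl⟩ := exists_decomp mid h2
      have hm2 : (a :: (m ++ [b])).length = m.length + 2 := by simp
      have g1 : PySem.List.pyGet? (pre ++ (a :: (m ++ [b])) ++ suf) (k : Int) = some a := by
        have := PySem.List.pyGet?_append_length (pre := pre) (y := a) (ys := m ++ [b] ++ suf)
        simpa [hpre, List.append_assoc] using this
      have hj : (k : Int) + ((a :: (m ++ [b])).length : Int) - 1 = ((k + m.length + 1 : Nat) : Int) := by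
        rw [hm2]; push_cast; ring
      have hsplit : pre ++ (a :: (m ++ [b])) ++ suf = (pre ++ a :: m) ++ b :: suf := by
        simp
      have g2 : PySem.List.pyGet? (pre ++ (a :: (m ++ [b])) ++ suf) ((k + m.length + 1 : Nat) : Int) = some b := by
        have := PySem.List.pyGet?_append_length (pre := pre ++ a :: m) (y := b) (ys := suf)
        rw [hsplit]
        simpa [hpre, Nat.add_assoc, Nat.add_comm] using this
      rw [loopB, dif_pos (by rw [hm2]; push_cast; omega), hj, g1, g2]
      have e1 : ((k : Int) + 1) = ((k + 1 : Nat) : Int) := by push_cast; ring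
      by_cases hab : a = b
      case neg =>
        rw [if_pos (by simp [hab])]
        have e2 : ((k + m.length + 1 : Nat) : Int) + 1 = ((k + m.length + 2 : Nat) : Int) := by
          push_cast; ring
        have d1 : (pre ++ (a :: (m ++ [b])) ++ suf).drop (k + 1) = (m ++ [b]) ++ suf := by
          rw [show pre ++ (a :: (m ++ [b])) ++ suf = (pre ++ [a]) ++ ((m ++ [b]) ++ suf) by simp]
          exact List.drop_left' (by simp [hpre])
        have d2 : (pre ++ (a :: (m ++ [b])) ++ suf).drop k = (a :: m) ++ (b :: suf) := by
          rw [show pre ++ (a :: (m ++ [b])) ++ suf = pre ++ ((a :: m) ++ (b :: suf)) by simp]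
          exact List.drop_left' hpre
        rw [e1, e2, PySem.List.slice_natCast, PySem.List.slice_natCast, d1, d2]
        rw [show k + m.length + 2 - (k + 1) = m.length + 1 by omega,
            show k + m.length + 1 - k = m.length + 1 by omega]
        rw [List.take_left' (by simp), List.take_left' (by simp)]
        rw [fC_step, if_neg hab]
        simp [PySem.List.slice?_none_none_neg_one]
      case pos =>
        rw [if_neg (by simp [hab])]
        have e3 : ((k + m.length + 1 : Nat) : Int) - 1 = ((k + 1 : Nat) : Int) + (m.length : Int) - 1 := by
          push_cast; ring
        rw [e1, e3]
        rw [show pre ++ (a :: (m ++ [b])) ++ suf = (pre ++ [a]) ++ m ++ (b :: suf) by simp]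
        rw [ih m.length (by omega) m rfl (pre ++ [a]) (b :: suf) (k + 1) (by simp [hpre]) (by simp [hsuf])]
        rw [fC_step, if_pos hab]

theorem loopB_eq_fC (l : List Char) : loopB l 0 ((l.length : Int) - 1) = fC l := by
  have := loopB_win l.length l rfl [] [] 0 rfl rfl
  simpa using this

-- ===== VERDICT (by name: the statement is the Claim_ definition above) =====
theorem recur_util_spec : Claim_equal_recur_util := by
  intro ls _ hpre
  unfold Spec_recur_util recur_util recur_util_alt
  rw [recurA_eq_fC hpre, loopB_eq_fC]
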